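-- pv_equiv track=rewrite | github.com/tolo/coding-agent-toolkit | hooks/scripts/protect-files.py | _extract_file_args
-- ===== SOURCE A (Python) =====
-- def _extract_file_args(args_str):
--     """Extract file path arguments from a command argument string.
--
--     Strips flags, handles --, returns remaining args as potential file paths.
--     """
--     parts = args_str.split()
--     files = []
--     past_flags = False
--     for part in parts:
--         if part == "--":
--             past_flags = True
--             continue
--         if not past_flags and part.startswith("-"):
--             continue
--         files.append(part)
--     return files
-- ===== SOURCE B (Python) =====
-- def _extract_file_args(args_str):
--     """Extract file path arguments from a command argument string.
--
--     Strips flags, handles --, returns remaining args as potential file paths.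
--     """
--     parts = args_str.split()
--     if "--" in parts:
--         i = parts.index("--")
--         return [p for p in parts[:i] if not p.startswith("-")] + \
--                [p for p in parts[i + 1:] if p != "--"]
--     return [p for p in parts if not p.startswith("-")]
-- ===== Notes on version B (the rewrite author's own statement) =====
-- stated objective: alternative
-- what changed: Replaced the stateful boolean loop with an index split at the first double-dash delimiter followed by two filtered slice passes (a flag filter on the prefix, a delimiter filter on the suffix).
import Mathlib
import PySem

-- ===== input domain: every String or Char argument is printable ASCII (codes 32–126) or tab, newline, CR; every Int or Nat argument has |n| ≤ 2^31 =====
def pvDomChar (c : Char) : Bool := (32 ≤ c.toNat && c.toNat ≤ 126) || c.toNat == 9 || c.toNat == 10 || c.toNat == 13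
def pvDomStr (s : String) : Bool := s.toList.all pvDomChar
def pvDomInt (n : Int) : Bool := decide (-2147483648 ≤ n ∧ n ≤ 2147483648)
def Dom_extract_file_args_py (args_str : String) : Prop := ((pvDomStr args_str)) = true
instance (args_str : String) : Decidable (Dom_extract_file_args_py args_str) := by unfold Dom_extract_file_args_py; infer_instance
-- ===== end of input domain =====

-- B replaces A's stateful boolean loop by an index split at the first delimiter token with two filtered passes; alternative decomposition, same cost.

-- ===== PORT A =====
-- loop body of A: state = (files, past_flags)
def pvStepA (st : List String × Bool) (part : String) : List String × Bool :=
  if part = "--" then (st.1, true)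
  else if !st.2 && PySem.Str.startswith part "-" then st
  else (st.1 ++ [part], st.2)

def extract_file_args_py (args_str : String) : List String :=
  let parts := PySem.Str.split₀ args_str
  (parts.foldl pvStepA ([], false)).1

-- ===== PORT B =====
def extract_file_args_py_alt (args_str : String) : List String :=
  let parts := PySem.Str.split₀ args_str
  match PySem.List.index? parts "--" with
  | some i =>
      (parts.take i).filter (fun p => !PySem.Str.startswith p "-")
        ++ (parts.drop (i + 1)).filter (fun p => p ≠ "--")
  | none => parts.filter (fun p => !PySem.Str.startswith p "-")

-- ===== PRECONDITION & SPEC =====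
def Spec_extract_file_args_py (args_str : String) (out : List String) : Prop := out = extract_file_args_py_alt args_str
instance (args_str : String) (out : List String) : Decidable (Spec_extract_file_args_py args_str out) := by unfold Spec_extract_file_args_py; infer_instance

-- ===== CLAIM (what is proved, stated in full; the proofs are below) =====
def Claim_equal_extract_file_args_py : Prop := ∀ (args_str : String), Dom_extract_file_args_py args_str → Spec_extract_file_args_py args_str (extract_file_args_py args_str)

-- ===== LEMMAS AND PROOFS =====

-- B's selection, as a function of the word list
def pvSelect (parts : List String) : List String :=
  match PySem.List.index? parts "--" with
  | some i =>
      (parts.take i).filter (fun p => !PySem.Str.startswith p "-")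
        ++ (parts.drop (i + 1)).filter (fun p => p ≠ "--")
  | none => parts.filter (fun p => !PySem.Str.startswith p "-")

lemma pvSelect_nil : pvSelect [] = [] := by simp [pvSelect, PySem.List.index?]

lemma pvSelect_cons_dd (rest : List String) :
    pvSelect ("--" :: rest) = rest.filter (fun p => p ≠ "--") := by
  unfold pvSelect
  rw [PySem.List.index?_cons_self]
  simp

lemma pvSelect_cons_ne {part : String} (rest : List String) (h : part ≠ "--") :
    pvSelect (part :: rest) =
      (if PySem.Str.startswith part "-" then [] else [part]) ++ pvSelect rest := by
  unfold pvSelect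
  rw [PySem.List.index?_cons_of_ne rest h]
  cases hi : PySem.List.index? rest "--" with
  | none => cases hb : PySem.Chars.startswith part.toList ['-'] <;> simp [List.filter_cons, hb]
  | some i => cases hb : PySem.Chars.startswith part.toList ['-'] <;> simp [List.filter_cons, hb]

-- once past_flags is true, A just keeps everything except "--"
theorem foldl_stepA_true (parts : List String) : ∀ acc : List String,
    parts.foldl pvStepA (acc, true) = (acc ++ parts.filter (fun p => p ≠ "--"), true) := by
  induction parts with
  | nil => simp
  | cons part rest ih =>
    intro acc
    by_cases h : part = "--" <;> simp [pvStepA, h, ih]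

theorem foldl_stepA_false (parts : List String) : ∀ acc : List String,
    (parts.foldl pvStepA (acc, false)).1 = acc ++ pvSelect parts := by
  induction parts with
  | nil => intro acc; simp [pvSelect_nil]
  | cons part rest ih =>
    intro acc
    by_cases h : part = "--"
    · subst h
      rw [pvSelect_cons_dd]
      simp only [List.foldl_cons]
      rw [show pvStepA (acc, false) "--" = (acc, true) from by simp [pvStepA],
        foldl_stepA_true]
    · rw [pvSelect_cons_ne rest h]
      by_cases hs : PySem.Chars.startswith part.toList ['-'] = true
      · simp only [List.foldl_cons]
        rw [show pvStepA (acc, false) part = (acc, false) from by simp [pvStepA, h, hs]]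
        simp [ih, hs]
      · simp only [List.foldl_cons]
        rw [show pvStepA (acc, false) part = (acc ++ [part], false) from by simp [pvStepA, h, hs]]
        simp [ih, hs]

-- ===== VERDICT (by name: the statement is the Claim_ definition above) =====
theorem extract_file_args_py_spec : Claim_equal_extract_file_args_py := by
  intro args_str _
  show _ = _
  rw [extract_file_args_py, extract_file_args_py_alt, foldl_stepA_false, List.nil_append]
  rfl
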